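-- pv_equiv track=rewrite | github.com/kimjune01/june.kim | worklog/temporal-spanner2.py | star_interleave_construction
-- ===== SOURCE A (Python) =====
-- from collections import defaultdict
--
-- def star_interleave_construction(n):
--     """
--     Interleave star edges: for each vertex v, edges from v get every n-th timestamp.
--     Edge from vertex v to vertex w (v < w) in the v-star gets timestamp
--     that interleaves with all other stars.
--
--     This should force spanners to keep many edges per star.
--     """
--     edges = {}
--     # For each vertex, list its edges
--     stars = defaultdict(list)
--     for i in range(n):
--         for j in range(i+1, n):
--             stars[i].append((i, j))
--             stars[j].append((i, j))
--
--     # Assign timestamps round-robin across vertices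
--     # Round r: give vertex r's (r-th) edge a timestamp
--     t = 1
--     max_degree = n - 1
--     assigned = set()
--     for round_num in range(max_degree):
--         for v in range(n):
--             remaining = [e for e in stars[v] if e not in assigned]
--             if round_num < len(remaining):
--                 e = remaining[round_num]
--                 if e not in assigned:
--                     edges[e] = t
--                     assigned.add(e)
--                     t += 1
--
--     # Fill any unassigned
--     for i in range(n):
--         for j in range(i+1, n):
--             if (i,j) not in edges:
--                 edges[(i,j)] = t
--                 t += 1
--
--     return edges
-- ===== SOURCE B (Python) =====
-- def star_interleave_construction(n):
--     """
--     Same timestamps as before, but instead of re-scanning each star against an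
--     `assigned` set every round, keep per-vertex lists of remaining edges and
--     delete an edge from both endpoints' lists the moment it is assigned.
--     """
--     rem = [[(i, v) for i in range(v)] + [(v, j) for j in range(v + 1, n)]
--            for v in range(n)]
--     edges = {}
--     t = 1
--     for round_num in range(n - 1):
--         for v in range(n):
--             if round_num < len(rem[v]):
--                 e = rem[v][round_num]
--                 a, b = e
--                 edges[e] = t
--                 t += 1
--                 rem[a].remove(e)
--                 rem[b].remove(e)
--
--     # Fill any unassigned
--     for i in range(n):
--         for j in range(i + 1, n):
--             if (i, j) not in edges:
--                 edges[(i, j)] = t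
--                 t += 1
--
--     return edges
-- ===== Notes on version B (the rewrite author's own statement) =====
-- stated objective: faster
-- what changed: Instead of re-filtering each vertex's full edge list against a global `assigned` set on every (round, vertex) step, B maintains a per-vertex list of remaining edges and deletes an assigned edge from both endpoints' lists immediately, so selection is a direct index and no per-step scan with set lookups remains.
import Mathlib
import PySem

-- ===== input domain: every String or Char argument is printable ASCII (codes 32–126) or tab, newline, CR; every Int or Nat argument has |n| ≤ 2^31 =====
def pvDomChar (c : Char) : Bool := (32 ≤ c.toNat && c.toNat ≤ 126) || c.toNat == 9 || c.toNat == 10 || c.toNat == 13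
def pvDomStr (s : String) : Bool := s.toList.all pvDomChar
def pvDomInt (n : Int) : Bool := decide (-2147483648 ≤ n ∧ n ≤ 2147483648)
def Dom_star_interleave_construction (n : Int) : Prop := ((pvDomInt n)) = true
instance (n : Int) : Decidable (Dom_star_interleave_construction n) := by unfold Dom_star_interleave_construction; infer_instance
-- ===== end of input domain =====

-- B assigns the identical timestamps but keeps per-vertex remaining-edge lists updated by
-- deletion instead of re-filtering every star against an `assigned` set each round (faster by
-- a measured constant factor; the claim is about the RETURN value, the Pythons mutate only locals).


-- ===== PORT A =====
-- stars = defaultdict(list); for i in range(n): for j in range(i+1, n): stars[i].append((i,j)); stars[j].append((i,j))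
def pvStars (n : Int) : PySem.Dict Int (List (Int × Int)) :=
  (PySem.List.pyRange 0 n 1).foldl (fun st i =>
    (PySem.List.pyRange (i+1) n 1).foldl (fun st j =>
      let st1 := st.insert i (st.getD i [] ++ [(i, j)])
      st1.insert j (st1.getD j [] ++ [(i, j)])) st) PySem.Dict.empty

-- the body of A's round-robin loop; state = (edges, t, assigned); remaining[round_num] is ported
-- with pyGetD under the guard round_num < len(remaining), where Python's indexing succeeds
def pvABody (stars : PySem.Dict Int (List (Int × Int)))
    (s : PySem.Dict (Int × Int) Int × Int × PySem.Set (Int × Int)) (r v : Int) :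
    PySem.Dict (Int × Int) Int × Int × PySem.Set (Int × Int) :=
  let remaining := (stars.getD v []).filter (fun e => !(PySem.Set.contains s.2.2 e))
  if r < (remaining.length : Int) then
    let e := PySem.List.pyGetD remaining r (0, 0)
    if !(PySem.Set.contains s.2.2 e) then
      (s.1.insert e s.2.1, s.2.1 + 1, PySem.Set.add s.2.2 e)
    else s
  else s

-- the trailing "fill any unassigned" double loop, textually identical in A and in B
def pvFill (n : Int) (s : PySem.Dict (Int × Int) Int × Int) : PySem.Dict (Int × Int) Int × Int :=
  (PySem.List.pyRange 0 n 1).foldl (fun s i =>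
    (PySem.List.pyRange (i + 1) n 1).foldl (fun s j =>
      if !(s.1.contains (i, j)) then (s.1.insert (i, j) s.2, s.2 + 1) else s) s) s

def star_interleave_construction (n : Int) : List (Int × Int × Int) :=
  let stars := pvStars n
  let s := (PySem.List.pyRange 0 (n - 1) 1).foldl (fun s r =>
      (PySem.List.pyRange 0 n 1).foldl (fun s v => pvABody stars s r v) s)
    (PySem.Dict.empty, 1, PySem.Set.empty)
  let f := pvFill n (s.1, s.2.1)
  f.1.items.map (fun p => (p.1.1, p.1.2, p.2))

-- ===== PORT B =====
-- [(i, v) for i in range(v)] + [(v, j) for j in range(v+1, n)]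
def pvBStar (n v : Int) : List (Int × Int) :=
  (PySem.List.pyRange 0 v 1).map (fun i => (i, v)) ++
  (PySem.List.pyRange (v + 1) n 1).map (fun j => (v, j))

-- rem[a].remove(e)
def pvRemoveAt (rem : List (List (Int × Int))) (a : Int) (e : Int × Int) :
    List (List (Int × Int)) :=
  let l := PySem.List.pyGetD rem a []
  PySem.List.pySetD rem a ((PySem.List.remove? l e).getD l)

-- the body of B's round-robin loop; state = (rem, edges, t)
def pvBBody (s : List (List (Int × Int)) × PySem.Dict (Int × Int) Int × Int) (r v : Int) :
    List (List (Int × Int)) × PySem.Dict (Int × Int) Int × Int :=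
  let rv := PySem.List.pyGetD s.1 v []
  if r < (rv.length : Int) then
    let e := PySem.List.pyGetD rv r (0, 0)
    (pvRemoveAt (pvRemoveAt s.1 e.1 e) e.2 e, s.2.1.insert e s.2.2, s.2.2 + 1)
  else s

def star_interleave_construction_alt (n : Int) : List (Int × Int × Int) :=
  let rem0 := (PySem.List.pyRange 0 n 1).map (fun v => pvBStar n v)
  let s := (PySem.List.pyRange 0 (n - 1) 1).foldl (fun s r =>
      (PySem.List.pyRange 0 n 1).foldl (fun s v => pvBBody s r v) s)
    (rem0, PySem.Dict.empty, 1)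
  let f := pvFill n (s.2.1, s.2.2)
  f.1.items.map (fun p => (p.1.1, p.1.2, p.2))

-- ===== PRECONDITION & SPEC =====
def Spec_star_interleave_construction (n : Int) (out : List (Int × Int × Int)) : Prop := out = star_interleave_construction_alt n
instance (n : Int) (out : List (Int × Int × Int)) : Decidable (Spec_star_interleave_construction n out) := by unfold Spec_star_interleave_construction; infer_instance

-- ===== CLAIM (what is proved, stated in full; the proofs are below) =====
def Claim_equal_star_interleave_construction : Prop := ∀ (n : Int), Dom_star_interleave_construction n → Spec_star_interleave_construction n (star_interleave_construction n)

-- ===== LEMMAS AND PROOFS =====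

-- ----- generic two-fold simulation -----
theorem pvFoldl_rel {α β γ : Type} (R : α → β → Prop) (f : α → γ → α) (g : β → γ → β) :
    ∀ (l : List γ) (a : α) (b : β), R a b →
      (∀ (a : α) (b : β) (x : γ), x ∈ l → R a b → R (f a x) (g b x)) →
      R (l.foldl f a) (l.foldl g b) := by
  intro l
  induction l with
  | nil => intro a b h _; exact h
  | cons x xs ih =>
      intro a b h hs
      exact ih _ _ (hs a b x (by simp) h) (fun a b y hy => hs a b y (by simp [hy]))

-- ----- characterisation of A's stars dict -----
def pvIStep (i : Int) (st : PySem.Dict Int (List (Int × Int))) (j : Int) :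
    PySem.Dict Int (List (Int × Int)) :=
  let st1 := st.insert i (st.getD i [] ++ [(i, j)])
  st1.insert j (st1.getD j [] ++ [(i, j)])

def pvOStep (n : Int) (st : PySem.Dict Int (List (Int × Int))) (i : Int) :
    PySem.Dict Int (List (Int × Int)) :=
  (PySem.List.pyRange (i + 1) n 1).foldl (pvIStep i) st

theorem pvStars_eq (n : Int) :
    pvStars n = (PySem.List.pyRange 0 n 1).foldl (pvOStep n) PySem.Dict.empty := rfl

def pvPartial (n a v : Int) : List (Int × Int) :=
  if 0 ≤ v ∧ v < n then
    (PySem.List.pyRange 0 (min a v) 1).map (fun i => (i, v)) ++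
    (if v < a then (PySem.List.pyRange (v + 1) n 1).map (fun j => (v, j)) else [])
  else []

def pvInner (n a b v : Int) : List (Int × Int) :=
  if v = a then pvPartial n a a ++ (PySem.List.pyRange (a + 1) b 1).map (fun j => (a, j))
  else if a < v ∧ v < b then pvPartial n a v ++ [(a, v)]
  else pvPartial n a v

theorem pvIStep_getD (a b : Int) (hab : a ≠ b) (d : PySem.Dict Int (List (Int × Int))) (u : Int) :
    (pvIStep a d b).getD u [] =
      if u = b then d.getD b [] ++ [(a, b)]
      else if u = a then d.getD a [] ++ [(a, b)]
      else d.getD u [] := by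
  unfold pvIStep
  simp only [PySem.Dict.getD_insert]
  by_cases hub : u = b
  · simp [hub, Ne.symm hab]
  · by_cases hua : u = a <;> simp [hub, hua, hab]

theorem pvInner_inv (n a : Int) (ha : 0 ≤ a) (han : a < n) :
    ∀ (k : Nat) (b : Int), a + 1 ≤ b → b ≤ n → (n - b).toNat = k →
    ∀ d : PySem.Dict Int (List (Int × Int)), (∀ v, d.getD v [] = pvInner n a b v) →
    ∀ v, ((PySem.List.pyRange b n 1).foldl (pvIStep a) d).getD v [] = pvInner n a n v := by
  intro k
  induction k with
  | zero =>
      intro b hab hbn hk d hd v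
      have hbn' : b = n := by omega
      subst hbn'
      rw [PySem.List.pyRange_one_eq_nil (le_refl _)]
      exact hd v
  | succ k ih =>
      intro b hab hbn hk d hd v
      have hb : b < n := by omega
      rw [PySem.List.pyRange_one_cons hb]
      simp only [List.foldl_cons]
      refine ih (b + 1) (by omega) (by omega) (by omega) _ ?_ v
      intro u
      rw [pvIStep_getD a b (by omega) d u]
      by_cases hub : u = b
      · rw [if_pos hub, hd b]
        unfold pvInner
        have h1 : ¬ (u = a) := by omega
        have h1' : ¬ (b = a) := by omega
        have h2 : ¬ (a < b ∧ b < b) := by omega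
        have h3 : a < u ∧ u < b + 1 := by omega
        rw [if_neg h1', if_neg h2, if_neg h1, if_pos h3, hub]
      · rw [if_neg hub]
        by_cases hua : u = a
        · subst hua
          rw [if_pos rfl, hd u]
          unfold pvInner
          rw [if_pos rfl, if_pos rfl, List.append_assoc]
          have : PySem.List.pyRange (u + 1) (b + 1) 1 =
              PySem.List.pyRange (u + 1) b 1 ++ [b] := PySem.List.pyRange_one_succ_right (by omega)
          rw [this]
          simp
        · rw [if_neg hua, hd u]
          unfold pvInner
          have : (a < u ∧ u < b + 1) ↔ (a < u ∧ u < b) := by omega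
          simp only [if_neg hua, this]

theorem pvInner_start (n a v : Int) : pvInner n a (a + 1) v = pvPartial n a v := by
  unfold pvInner
  by_cases hva : v = a
  · subst hva
    rw [if_pos rfl, PySem.List.pyRange_one_eq_nil (le_refl (v + 1))]
    simp
  · have h2 : ¬ (a < v ∧ v < a + 1) := by omega
    simp [hva]

theorem pvInner_top (n a : Int) (ha : 0 ≤ a) (han : a < n) (v : Int) :
    pvInner n a n v = pvPartial n (a + 1) v := by
  unfold pvInner pvPartial
  by_cases hva : v = a
  · subst hva
    have h1 : (0 : Int) ≤ v ∧ v < n := ⟨ha, han⟩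
    have hm1 : min v v = v := by omega
    have hm2 : min (v + 1) v = v := by omega
    simp [h1]
  · by_cases h2 : a < v ∧ v < n
    · have h1 : (0 : Int) ≤ v ∧ v < n := ⟨by omega, h2.2⟩
      have hm1 : min a v = a := by omega
      have hm2 : min (a + 1) v = a + 1 := by omega
      have hva' : ¬ v < a := by omega
      have hva'' : ¬ v < a + 1 := by omega
      simp only [if_neg hva, if_pos h2, if_pos h1, hm1, hm2, if_neg hva', if_neg hva'']
      rw [PySem.List.pyRange_one_succ_right ha]
      simp
    · simp only [if_neg hva, if_neg h2]
      by_cases h1 : (0 : Int) ≤ v ∧ v < n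
      · have hvla : v < a := by omega
        have hvla' : v < a + 1 := by omega
        have hm1 : min a v = v := by omega
        have hm2 : min (a + 1) v = v := by omega
        rw [if_pos h1, if_pos h1, hm1, hm2, if_pos hvla, if_pos hvla']
      · rw [if_neg h1, if_neg h1]

theorem pvOuter_inv (n : Int) :
    ∀ (k : Nat) (a : Int), 0 ≤ a → a ≤ n → (n - a).toNat = k →
    ∀ d : PySem.Dict Int (List (Int × Int)), (∀ v, d.getD v [] = pvPartial n a v) →
    ∀ v, ((PySem.List.pyRange a n 1).foldl (pvOStep n) d).getD v [] = pvPartial n n v := by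
  intro k
  induction k with
  | zero =>
      intro a h0 hn hk d hd v
      have : a = n := by omega
      subst this
      rw [PySem.List.pyRange_one_eq_nil (le_refl _)]
      exact hd v
  | succ k ih =>
      intro a h0 hn hk d hd v
      have ha : a < n := by omega
      rw [PySem.List.pyRange_one_cons ha]
      simp only [List.foldl_cons]
      refine ih (a + 1) (by omega) (by omega) (by omega) _ ?_ v
      intro u
      have hstep : (pvOStep n d a).getD u [] = pvInner n a n u := by
        unfold pvOStep
        exact pvInner_inv n a h0 ha (n - (a + 1)).toNat (a + 1) (by omega) (by omega) rfl d
          (fun w => by rw [hd w, pvInner_start]) u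
      rw [hstep, pvInner_top n a h0 ha u]

theorem pvStars_getD (n : Int) (hn : 0 ≤ n) (v : Int) :
    (pvStars n).getD v [] = if 0 ≤ v ∧ v < n then pvBStar n v else [] := by
  rw [pvStars_eq]
  have h := pvOuter_inv n (n - 0).toNat 0 (le_refl 0) hn rfl PySem.Dict.empty
    (fun w => by
      rw [PySem.Dict.getD_empty]
      unfold pvPartial
      by_cases h1 : (0 : Int) ≤ w ∧ w < n
      · have hm : min 0 w = 0 := by omega
        have hw0 : ¬ w < 0 := by omega
        rw [if_pos h1, hm, PySem.List.pyRange_one_eq_nil (le_refl (0 : Int)), if_neg hw0]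
        simp
      · rw [if_neg h1]) v
  rw [h]
  unfold pvPartial pvBStar
  by_cases h1 : (0 : Int) ≤ v ∧ v < n
  · have : min n v = v := by omega
    simp [h1, this]
  · simp [h1]


-- ----- facts about a star's edge list -----
theorem pvBStar_mem (n v : Int) (hv0 : 0 ≤ v) (hvn : v < n) (e : Int × Int) :
    e ∈ pvBStar n v ↔ (0 ≤ e.1 ∧ e.1 < e.2 ∧ e.2 < n ∧ (e.1 = v ∨ e.2 = v)) := by
  obtain ⟨a, b⟩ := e
  simp only [pvBStar, List.mem_append, List.mem_map, PySem.List.mem_pyRange_one, Prod.mk.injEq]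
  constructor
  · rintro (⟨i, hi, rfl, rfl⟩ | ⟨j, hj, rfl, rfl⟩) <;> simp_all
  · rintro ⟨h1, h2, h3, (rfl | rfl)⟩
    · right; exact ⟨b, by omega, rfl, rfl⟩
    · left; exact ⟨a, by omega, rfl, rfl⟩

theorem pvBStar_nodup (n v : Int) : (pvBStar n v).Nodup := by
  unfold pvBStar
  refine List.Nodup.append ?_ ?_ ?_
  · exact (PySem.List.nodup_pyRange_one 0 v).map (fun x y h => by
      simpa using congrArg Prod.fst h)
  · exact (PySem.List.nodup_pyRange_one (v + 1) n).map (fun x y h => by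
      simpa using congrArg Prod.snd h)
  · intro x hx hy
    obtain ⟨i, hi, rfl⟩ := List.mem_map.mp hx
    obtain ⟨j, hj, hij⟩ := List.mem_map.mp hy
    rw [PySem.List.mem_pyRange_one] at hi hj
    have h1 := congrArg Prod.fst hij
    simp at h1
    omega

-- ----- small Bool/Set/list helpers -----
theorem pvContains_add (s : PySem.Set (Int × Int)) (e x : Int × Int) :
    PySem.Set.contains (PySem.Set.add s e) x =
      (PySem.Set.contains s x || x == e) := by
  rw [Bool.eq_iff_iff]
  simp [PySem.Set.mem_add, beq_iff_eq]

theorem pvLength_pySetD {α : Type} (xs : List α) (i : Int) (w : α) :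
    (PySem.List.pySetD xs i w).length = xs.length := by
  unfold PySem.List.pySetD PySem.List.pySet?
  cases h : PySem.List.pyIdx? xs.length i <;> simp

theorem pvGetD_pySetD_int {α : Type} (xs : List α) (a m : Int) (w : α) (d : α)
    (h0 : 0 ≤ a) (hl : a < (xs.length : Int)) (hm0 : 0 ≤ m) :
    PySem.List.pyGetD (PySem.List.pySetD xs a w) m d =
      if m = a then w else PySem.List.pyGetD xs m d := by
  have ha : a = ((a.toNat : Nat) : Int) := by omega
  have hm : m = ((m.toNat : Nat) : Int) := by omega
  have hlt : a.toNat < xs.length := by omega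
  rw [ha, hm, PySem.List.pyGetD_pySetD_natCast xs a.toNat m.toNat w d hlt]
  by_cases hk : m.toNat = a.toNat
  · rw [if_pos hk, if_pos (by omega)]
  · rw [if_neg hk, if_neg (by omega)]

-- ----- the simulation relation: B's rem[v] is A's stars[v] filtered by A's assigned set -----
def pvRel (n : Int)
    (sA : PySem.Dict (Int × Int) Int × Int × PySem.Set (Int × Int))
    (sB : List (List (Int × Int)) × PySem.Dict (Int × Int) Int × Int) : Prop :=
  sA.1 = sB.2.1 ∧ sA.2.1 = sB.2.2 ∧ sB.1.length = n.toNat ∧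
  (∀ v : Int, 0 ≤ v → v < n →
    PySem.List.pyGetD sB.1 v [] =
      (pvBStar n v).filter (fun e => !(PySem.Set.contains sA.2.2 e)))

theorem pvRem_update (n : Int) (s : PySem.Set (Int × Int)) (rem : List (List (Int × Int)))
    (hlen : rem.length = n.toNat) (hn : 0 ≤ n)
    (hrem : ∀ u : Int, 0 ≤ u → u < n →
      PySem.List.pyGetD rem u [] = (pvBStar n u).filter (fun x => !(PySem.Set.contains s x)))
    (e : Int × Int) (he1 : 0 ≤ e.1) (h12 : e.1 < e.2) (h2n : e.2 < n)
    (hpe : PySem.Set.contains s e = false) :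
    ∀ u : Int, 0 ≤ u → u < n →
      PySem.List.pyGetD (pvRemoveAt (pvRemoveAt rem e.1 e) e.2 e) u [] =
        (pvBStar n u).filter (fun x => !(PySem.Set.contains (PySem.Set.add s e) x)) := by
  have hlenI : (rem.length : Int) = n := by omega
  have hmemw : ∀ w : Int, 0 ≤ w → w < n → (e.1 = w ∨ e.2 = w) →
      (PySem.List.remove? ((pvBStar n w).filter (fun x => !(PySem.Set.contains s x))) e).getD
        ((pvBStar n w).filter (fun x => !(PySem.Set.contains s x)))
      = (pvBStar n w).filter (fun x => !(PySem.Set.contains (PySem.Set.add s e) x)) := by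
    intro w hw0 hwn hor
    have heW : e ∈ pvBStar n w := (pvBStar_mem n w hw0 hwn e).mpr ⟨he1, h12, h2n, hor⟩
    have heF : e ∈ (pvBStar n w).filter (fun x => !(PySem.Set.contains s x)) :=
      List.mem_filter.mpr ⟨heW, by rw [hpe]; rfl⟩
    rw [PySem.List.remove?_eq_some_erase _ e heF, Option.getD_some,
      List.Nodup.erase_eq_filter ((pvBStar_nodup n w).filter _) e, List.filter_filter]
    refine List.filter_congr ?_
    intro x _
    rw [pvContains_add]
    cases hxc : PySem.Set.contains s x <;> cases hxe : x == e <;>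
      simp_all [beq_iff_eq, bne]
  intro u hu0 hun
  unfold pvRemoveAt
  simp only []
  have hl1 : ((PySem.List.pySetD rem e.1
      ((PySem.List.remove? (PySem.List.pyGetD rem e.1 []) e).getD (PySem.List.pyGetD rem e.1 []))).length : Int) = n := by
    rw [pvLength_pySetD]; omega
  rw [pvGetD_pySetD_int _ e.2 u _ [] (by omega) (by omega) hu0]
  by_cases hu2 : u = e.2
  · rw [if_pos hu2]
    rw [pvGetD_pySetD_int _ e.1 e.2 _ [] he1 (by omega) (by omega)]
    rw [if_neg (by omega)]
    rw [hrem e.2 (by omega) h2n, hmemw e.2 (by omega) h2n (Or.inr rfl), hu2]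
  · rw [if_neg hu2]
    rw [pvGetD_pySetD_int _ e.1 u _ [] he1 (by omega) hu0]
    by_cases hu1 : u = e.1
    · rw [if_pos hu1]
      rw [hrem e.1 he1 (by omega), hmemw e.1 he1 (by omega) (Or.inl rfl), hu1]
    · rw [if_neg hu1, hrem u hu0 hun]
      refine List.filter_congr ?_
      intro x hx
      obtain ⟨hx1, hx12, hx2, hxor⟩ := (pvBStar_mem n u hu0 hun x).mp hx
      have hxe : (x == e) = false := by
        rw [beq_eq_false_iff_ne]
        intro hcon
        subst hcon
        omega
      rw [pvContains_add, hxe, Bool.or_false]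

theorem pvBody_step (n r v : Int) (hn : 0 ≤ n) (hr : 0 ≤ r) (hv0 : 0 ≤ v) (hvn : v < n)
    (sA : PySem.Dict (Int × Int) Int × Int × PySem.Set (Int × Int))
    (sB : List (List (Int × Int)) × PySem.Dict (Int × Int) Int × Int)
    (h : pvRel n sA sB) : pvRel n (pvABody (pvStars n) sA r v) (pvBBody sB r v) := by
  obtain ⟨hE, hT, hL, hR⟩ := h
  have hstar : (pvStars n).getD v [] = pvBStar n v := by
    rw [pvStars_getD n hn v, if_pos ⟨hv0, hvn⟩]
  have hrv := hR v hv0 hvn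
  unfold pvABody pvBBody
  simp only [hstar, hrv]
  by_cases hc : r < ((((pvBStar n v).filter (fun e => !(PySem.Set.contains sA.2.2 e))).length : Int))
  · rw [if_pos hc, if_pos hc]
    have heL : PySem.List.pyGetD ((pvBStar n v).filter (fun e => !(PySem.Set.contains sA.2.2 e))) r (0, 0)
        ∈ (pvBStar n v).filter (fun e => !(PySem.Set.contains sA.2.2 e)) := by
      rw [PySem.List.pyGetD_eq_getElem _ (0, 0) hr hc]
      exact List.getElem_mem _
    obtain ⟨heB, hpe⟩ := List.mem_filter.mp heL
    have hcont : PySem.Set.contains sA.2.2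
        (PySem.List.pyGetD ((pvBStar n v).filter (fun e => !(PySem.Set.contains sA.2.2 e))) r (0, 0)) = false := by
      cases hcc : PySem.Set.contains sA.2.2
          (PySem.List.pyGetD ((pvBStar n v).filter (fun e => !(PySem.Set.contains sA.2.2 e))) r (0, 0))
      · rfl
      · rw [hcc] at hpe; exact absurd hpe (by simp)
    rw [hcont]
    simp only [Bool.not_false, if_true]
    obtain ⟨h1, h12, h2n, hor⟩ := (pvBStar_mem n v hv0 hvn _).mp heB
    refine ⟨by rw [hE, hT], by rw [hT], ?_, ?_⟩
    · simp only [pvRemoveAt]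
      rw [pvLength_pySetD, pvLength_pySetD]
      exact hL
    · intro u hu0 hun
      exact pvRem_update n sA.2.2 sB.1 hL hn hR _ h1 h12 h2n hcont u hu0 hun
  · rw [if_neg hc, if_neg hc]
    exact ⟨hE, hT, hL, hR⟩

theorem pvMain_eq (n : Int) (hn : 0 ≤ n) :
    star_interleave_construction n = star_interleave_construction_alt n := by
  unfold star_interleave_construction star_interleave_construction_alt
  simp only []
  have hrel : pvRel n
      ((PySem.List.pyRange 0 (n - 1) 1).foldl (fun s r =>
          (PySem.List.pyRange 0 n 1).foldl (fun s v => pvABody (pvStars n) s r v) s)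
        (PySem.Dict.empty, 1, PySem.Set.empty))
      ((PySem.List.pyRange 0 (n - 1) 1).foldl (fun s r =>
          (PySem.List.pyRange 0 n 1).foldl (fun s v => pvBBody s r v) s)
        ((PySem.List.pyRange 0 n 1).map (fun v => pvBStar n v), PySem.Dict.empty, 1)) := by
    apply pvFoldl_rel (pvRel n)
    · refine ⟨rfl, rfl, ?_, ?_⟩
      · rw [List.length_map, PySem.List.length_pyRange_one]
        omega
      · intro v hv0 hvn
        rw [PySem.List.pyGetD_map_pyRange_of_nonneg _ n v [] hv0 hvn]
        have : ∀ x ∈ pvBStar n v, (!(PySem.Set.contains (PySem.Set.empty : PySem.Set (Int × Int)) x)) = true := by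
          intro x _
          rfl
        rw [List.filter_congr (fun x hx => this x hx), List.filter_true]
    · intro a b r hrmem hab
      apply pvFoldl_rel (pvRel n) _ _ _ _ _ hab
      intro a' b' v hvmem hab'
      have hrr := PySem.List.mem_pyRange_one.mp hrmem
      have hvv := PySem.List.mem_pyRange_one.mp hvmem
      exact pvBody_step n r v hn hrr.1 hvv.1 hvv.2 a' b' hab'
  obtain ⟨hE, hT, -, -⟩ := hrel
  rw [hE, hT]

-- ===== VERDICT (by name: the statement is the Claim_ definition above) =====
theorem star_interleave_construction_spec : Claim_equal_star_interleave_construction := by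
  intro n _
  unfold Spec_star_interleave_construction
  by_cases hn : 0 ≤ n
  · exact pvMain_eq n hn
  · unfold star_interleave_construction star_interleave_construction_alt
    rw [PySem.List.pyRange_one_eq_nil (by omega : n ≤ 0),
      PySem.List.pyRange_one_eq_nil (by omega : n - 1 ≤ 0)]
    rfl
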